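-- pv_equiv track=rewrite | github.com/gmnurlintang/Hurricane_Project | projec_hurricane_complete_codecademy.py | scalling_hurricane
-- ===== SOURCE A (Python) =====
-- def scalling_hurricane(dictionary1, key):
--     mortality_scale = {0: 0,
--                        1: 100,
--                        2: 500,
--                        3: 1000,
--                        4: 10000}
--     temp_scale = {0: [], 1: [], 2: [], 3: [], 4: [], 5: []}
--     for main_key, data in dictionary1.items():
--         for sub_key, value in data.items():
--             if sub_key == key:
--                 if value == mortality_scale[0]:
--                     temp_scale[0].append(main_key)
--                 elif value <= mortality_scale[1]:
--                     temp_scale[1].append(main_key)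
--                 elif value <= mortality_scale[2]:
--                     temp_scale[2].append(main_key)
--                 elif value <= mortality_scale[3]:
--                     temp_scale[3].append(main_key)
--                 elif value <= mortality_scale[4]:
--                     temp_scale[4].append(main_key)
--                 else:
--                     temp_scale[5].append(main_key)
--     return temp_scale
-- ===== SOURCE B (Python) =====
-- def scalling_hurricane(dictionary1, key):
--     # staged passes: first extract all (main_key, value) pairs for the key,
--     # then build each bucket independently by filtering the extracted list
--     hits = [(main_key, value)
--             for main_key, data in dictionary1.items()
--             for sub_key, value in data.items()
--             if sub_key == key]
--     predicates = [
--         lambda v: v == 0,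
--         lambda v: v != 0 and v <= 100,
--         lambda v: v != 0 and 100 < v <= 500,
--         lambda v: v != 0 and 500 < v <= 1000,
--         lambda v: v != 0 and 1000 < v <= 10000,
--         lambda v: v != 0 and 10000 < v,
--     ]
--     return {i: [mk for mk, v in hits if p(v)]
--             for i, p in enumerate(predicates)}
-- ===== Notes on version B (the rewrite author's own statement) =====
-- stated objective: alternative
-- what changed: Replaces A's single bucketing pass (appending into pre-seeded dict lists through a five-way if/elif cascade) with staged passes: one extraction pass collects all (main_key, value) hits for the key, then each of the six buckets is built independently by filtering that list with its own range predicate.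
import Mathlib
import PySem

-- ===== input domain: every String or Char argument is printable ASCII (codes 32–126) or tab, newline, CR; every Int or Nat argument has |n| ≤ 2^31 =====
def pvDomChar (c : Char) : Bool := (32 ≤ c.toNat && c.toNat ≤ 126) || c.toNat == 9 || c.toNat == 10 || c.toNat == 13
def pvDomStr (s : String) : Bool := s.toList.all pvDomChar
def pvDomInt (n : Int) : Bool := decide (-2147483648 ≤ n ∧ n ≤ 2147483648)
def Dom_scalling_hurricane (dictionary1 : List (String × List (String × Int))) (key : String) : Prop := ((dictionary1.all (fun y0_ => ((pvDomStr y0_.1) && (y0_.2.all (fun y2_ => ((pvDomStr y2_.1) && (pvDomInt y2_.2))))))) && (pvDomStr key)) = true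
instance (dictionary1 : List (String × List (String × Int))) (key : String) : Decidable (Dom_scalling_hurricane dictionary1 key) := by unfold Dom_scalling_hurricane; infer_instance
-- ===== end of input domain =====

-- B restructures A's single bucketing pass into staged passes: one extraction pass collecting all
-- (main_key, value) hits for the key, then each of the six buckets is built independently by
-- filtering that list with its own range predicate; alternative decomposition, same cost.

-- ===== PORT A =====
def scalling_hurricane (dictionary1 : List (String × List (String × Int))) (key : String) : List (Int × List String) :=
  let mortality_scale : PySem.Dict Int Int :=
    PySem.Dict.ofList [(0, 0), (1, 100), (2, 500), (3, 1000), (4, 10000)]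
  let temp_scale : PySem.Dict Int (List String) :=
    PySem.Dict.ofList [(0, []), (1, []), (2, []), (3, []), (4, []), (5, [])]
  let final := dictionary1.foldl (fun temp p =>
    p.2.foldl (fun temp q =>
      if q.1 == key then
        if q.2 == mortality_scale.getD 0 0 then temp.modify 0 [] (fun l => l ++ [p.1])
        else if q.2 ≤ mortality_scale.getD 1 0 then temp.modify 1 [] (fun l => l ++ [p.1])
        else if q.2 ≤ mortality_scale.getD 2 0 then temp.modify 2 [] (fun l => l ++ [p.1])
        else if q.2 ≤ mortality_scale.getD 3 0 then temp.modify 3 [] (fun l => l ++ [p.1])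
        else if q.2 ≤ mortality_scale.getD 4 0 then temp.modify 4 [] (fun l => l ++ [p.1])
        else temp.modify 5 [] (fun l => l ++ [p.1])
      else temp) temp) temp_scale
  final.items

-- ===== PORT B =====
-- the dict comprehension over enumerate(predicates) has the distinct keys 0..5 in order,
-- so its items are exactly this mapped enumerate list
def scalling_hurricane_alt (dictionary1 : List (String × List (String × Int))) (key : String) : List (Int × List String) :=
  let hits : List (String × Int) :=
    dictionary1.flatMap (fun p =>
      p.2.filterMap (fun q => if q.1 == key then some (p.1, q.2) else none))
  let predicates : List (Int → Bool) :=
    [fun v => v == 0,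
     fun v => !(v == 0) && decide (v ≤ 100),
     fun v => !(v == 0) && (decide (100 < v) && decide (v ≤ 500)),
     fun v => !(v == 0) && (decide (500 < v) && decide (v ≤ 1000)),
     fun v => !(v == 0) && (decide (1000 < v) && decide (v ≤ 10000)),
     fun v => !(v == 0) && decide (10000 < v)]
  (PySem.List.enumerate predicates 0).map
    (fun ip => (ip.1, (hits.filter (fun h => ip.2 h.2)).map (fun h => h.1)))

-- ===== PRECONDITION & SPEC =====
def Spec_scalling_hurricane (dictionary1 : List (String × List (String × Int))) (key : String) (out : List (Int × List String)) : Prop := out = scalling_hurricane_alt dictionary1 key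
instance (dictionary1 : List (String × List (String × Int))) (key : String) (out : List (Int × List String)) : Decidable (Spec_scalling_hurricane dictionary1 key out) := by unfold Spec_scalling_hurricane; infer_instance

-- ===== CLAIM =====
def Claim_equal_scalling_hurricane : Prop := ∀ (dictionary1 : List (String × List (String × Int))) (key : String), Dom_scalling_hurricane dictionary1 key → Spec_scalling_hurricane dictionary1 key (scalling_hurricane dictionary1 key)

-- ===== LEMMAS AND PROOFS =====
-- abbreviations and lemmas used only by the proofs
def pvMkD (a b c d e f : List String) : PySem.Dict Int (List String) :=
  PySem.Dict.ofList [(0, a), (1, b), (2, c), (3, d), (4, e), (5, f)]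

def pvP : Fin 6 → Int → Bool
  | 0 => fun v => v == 0
  | 1 => fun v => !(v == 0) && decide (v ≤ 100)
  | 2 => fun v => !(v == 0) && (decide (100 < v) && decide (v ≤ 500))
  | 3 => fun v => !(v == 0) && (decide (500 < v) && decide (v ≤ 1000))
  | 4 => fun v => !(v == 0) && (decide (1000 < v) && decide (v ≤ 10000))
  | 5 => fun v => !(v == 0) && decide (10000 < v)

def pvBk (i : Fin 6) (hits : List (String × Int)) : List String :=
  (hits.filter (fun h => pvP i h.2)).map (fun h => h.1)

def pvHitsOf (key m : String) (data : List (String × Int)) : List (String × Int) :=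
  data.filterMap (fun q => if q.1 == key then some (m, q.2) else none)

def pvHits (key : String) (d1 : List (String × List (String × Int))) : List (String × Int) :=
  d1.flatMap (fun p => pvHitsOf key p.1 p.2)

lemma pvBk_append (i : Fin 6) (h1 h2 : List (String × Int)) :
    pvBk i (h1 ++ h2) = pvBk i h1 ++ pvBk i h2 := by
  simp [pvBk]

lemma pvBk_cons (i : Fin 6) (m : String) (v : Int) (rest : List (String × Int)) :
    pvBk i ((m, v) :: rest) = (if pvP i v then [m] else []) ++ pvBk i rest := by
  simp [pvBk, List.filter_cons]
  split_ifs <;> simp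

lemma pvHitsOf_cons (key m : String) (q : String × Int) (rest : List (String × Int)) :
    pvHitsOf key m (q :: rest)
    = (if (q.1 == key) = true then [(m, q.2)] else []) ++ pvHitsOf key m rest := by
  simp only [pvHitsOf, List.filterMap_cons]
  split_ifs with h <;> simp
lemma pv_mod0 (a b c d e f : List String) (g : List String → List String) :
    (pvMkD a b c d e f).modify 0 [] g = pvMkD (g a) b c d e f := rfl
lemma pv_mod1 (a b c d e f : List String) (g : List String → List String) :
    (pvMkD a b c d e f).modify 1 [] g = pvMkD a (g b) c d e f := rfl
lemma pv_mod2 (a b c d e f : List String) (g : List String → List String) :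
    (pvMkD a b c d e f).modify 2 [] g = pvMkD a b (g c) d e f := rfl
lemma pv_mod3 (a b c d e f : List String) (g : List String → List String) :
    (pvMkD a b c d e f).modify 3 [] g = pvMkD a b c (g d) e f := rfl
lemma pv_mod4 (a b c d e f : List String) (g : List String → List String) :
    (pvMkD a b c d e f).modify 4 [] g = pvMkD a b c d (g e) f := rfl
lemma pv_mod5 (a b c d e f : List String) (g : List String → List String) :
    (pvMkD a b c d e f).modify 5 [] g = pvMkD a b c d e (g f) := rfl
lemma pv_cascade (a b c d e f : List String) (v : Int) (m : String) :
    (if v == (0:Int) then (pvMkD a b c d e f).modify 0 [] (fun l => l ++ [m])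
     else if v ≤ 100 then (pvMkD a b c d e f).modify 1 [] (fun l => l ++ [m])
     else if v ≤ 500 then (pvMkD a b c d e f).modify 2 [] (fun l => l ++ [m])
     else if v ≤ 1000 then (pvMkD a b c d e f).modify 3 [] (fun l => l ++ [m])
     else if v ≤ 10000 then (pvMkD a b c d e f).modify 4 [] (fun l => l ++ [m])
     else (pvMkD a b c d e f).modify 5 [] (fun l => l ++ [m]))
    = pvMkD (a ++ if pvP 0 v then [m] else []) (b ++ if pvP 1 v then [m] else []) (c ++ if pvP 2 v then [m] else []) (d ++ if pvP 3 v then [m] else []) (e ++ if pvP 4 v then [m] else []) (f ++ if pvP 5 v then [m] else []) := by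
  by_cases h0 : v = 0
  · subst h0
    rw [if_pos (by simp), pv_mod0]
    simp [pvP]
  · by_cases h1 : v ≤ 100
    · rw [if_neg (by simpa using h0), if_pos h1, pv_mod1]
      have e0 : pvP 0 v = false := by simp [pvP]; omega
      have e1 : pvP 1 v = true := by simp [pvP]; omega
      have e2 : pvP 2 v = false := by simp [pvP]; omega
      have e3 : pvP 3 v = false := by simp [pvP]; omega
      have e4 : pvP 4 v = false := by simp [pvP]; omega
      have e5 : pvP 5 v = false := by simp [pvP]; omega
      simp [e0, e1, e2, e3, e4, e5]
    · by_cases h2 : v ≤ 500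
      · rw [if_neg (by simpa using h0), if_neg h1, if_pos h2, pv_mod2]
        have e0 : pvP 0 v = false := by simp [pvP]; omega
        have e1 : pvP 1 v = false := by simp [pvP]; omega
        have e2 : pvP 2 v = true := by simp [pvP]; omega
        have e3 : pvP 3 v = false := by simp [pvP]; omega
        have e4 : pvP 4 v = false := by simp [pvP]; omega
        have e5 : pvP 5 v = false := by simp [pvP]; omega
        simp [e0, e1, e2, e3, e4, e5]
      · by_cases h3 : v ≤ 1000
        · rw [if_neg (by simpa using h0), if_neg h1, if_neg h2, if_pos h3, pv_mod3]
          have e0 : pvP 0 v = false := by simp [pvP]; omega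
          have e1 : pvP 1 v = false := by simp [pvP]; omega
          have e2 : pvP 2 v = false := by simp [pvP]; omega
          have e3 : pvP 3 v = true := by simp [pvP]; omega
          have e4 : pvP 4 v = false := by simp [pvP]; omega
          have e5 : pvP 5 v = false := by simp [pvP]; omega
          simp [e0, e1, e2, e3, e4, e5]
        · by_cases h4 : v ≤ 10000
          · rw [if_neg (by simpa using h0), if_neg h1, if_neg h2, if_neg h3, if_pos h4, pv_mod4]
            have e0 : pvP 0 v = false := by simp [pvP]; omega
            have e1 : pvP 1 v = false := by simp [pvP]; omega
            have e2 : pvP 2 v = false := by simp [pvP]; omega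
            have e3 : pvP 3 v = false := by simp [pvP]; omega
            have e4 : pvP 4 v = true := by simp [pvP]; omega
            have e5 : pvP 5 v = false := by simp [pvP]; omega
            simp [e0, e1, e2, e3, e4, e5]
          · rw [if_neg (by simpa using h0), if_neg h1, if_neg h2, if_neg h3, if_neg h4, pv_mod5]
            have e0 : pvP 0 v = false := by simp [pvP]; omega
            have e1 : pvP 1 v = false := by simp [pvP]; omega
            have e2 : pvP 2 v = false := by simp [pvP]; omega
            have e3 : pvP 3 v = false := by simp [pvP]; omega
            have e4 : pvP 4 v = false := by simp [pvP]; omega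
            have e5 : pvP 5 v = true := by simp [pvP]; omega
            simp [e0, e1, e2, e3, e4, e5]

lemma pv_inner (key m : String) (data : List (String × Int)) (a b c d e f : List String) :
    data.foldl (fun temp q =>
      if q.1 == key then
        (if q.2 == (0:Int) then (temp).modify 0 [] (fun l => l ++ [m])
         else if q.2 ≤ 100 then (temp).modify 1 [] (fun l => l ++ [m])
         else if q.2 ≤ 500 then (temp).modify 2 [] (fun l => l ++ [m])
         else if q.2 ≤ 1000 then (temp).modify 3 [] (fun l => l ++ [m])
         else if q.2 ≤ 10000 then (temp).modify 4 [] (fun l => l ++ [m])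
         else (temp).modify 5 [] (fun l => l ++ [m]))
      else temp) (pvMkD a b c d e f)
    = pvMkD (a ++ pvBk 0 (pvHitsOf key m data)) (b ++ pvBk 1 (pvHitsOf key m data)) (c ++ pvBk 2 (pvHitsOf key m data)) (d ++ pvBk 3 (pvHitsOf key m data)) (e ++ pvBk 4 (pvHitsOf key m data)) (f ++ pvBk 5 (pvHitsOf key m data)) := by
  induction data generalizing a b c d e f with
  | nil => simp [pvHitsOf, pvBk]
  | cons q rest ih =>
    rw [List.foldl_cons]
    by_cases h : (q.1 == key) = true
    · simp only [h, if_true]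
      rw [pv_cascade, ih]
      simp [pvHitsOf_cons, h, pvBk_cons, List.append_assoc]
    · simp only [h, Bool.false_eq_true, if_false]
      rw [ih]
      simp [pvHitsOf_cons, h]

lemma pv_outer (key : String) (d1 : List (String × List (String × Int))) (a b c d e f : List String) :
    d1.foldl (fun temp p =>
      p.2.foldl (fun temp q =>
        if q.1 == key then
          (if q.2 == (0:Int) then (temp).modify 0 [] (fun l => l ++ [p.1])
           else if q.2 ≤ 100 then (temp).modify 1 [] (fun l => l ++ [p.1])
           else if q.2 ≤ 500 then (temp).modify 2 [] (fun l => l ++ [p.1])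
           else if q.2 ≤ 1000 then (temp).modify 3 [] (fun l => l ++ [p.1])
           else if q.2 ≤ 10000 then (temp).modify 4 [] (fun l => l ++ [p.1])
           else (temp).modify 5 [] (fun l => l ++ [p.1]))
        else temp) temp) (pvMkD a b c d e f)
    = pvMkD (a ++ pvBk 0 (pvHits key d1)) (b ++ pvBk 1 (pvHits key d1)) (c ++ pvBk 2 (pvHits key d1)) (d ++ pvBk 3 (pvHits key d1)) (e ++ pvBk 4 (pvHits key d1)) (f ++ pvBk 5 (pvHits key d1)) := by
  induction d1 generalizing a b c d e f with
  | nil => simp [pvHits, pvBk]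
  | cons p rest ih =>
    rw [List.foldl_cons, pv_inner, ih]
    simp [pvHits, pvBk_append, List.append_assoc]


-- ===== VERDICT =====
theorem scalling_hurricane_spec : Claim_equal_scalling_hurricane := by
  intro d1 key _
  show scalling_hurricane d1 key = scalling_hurricane_alt d1 key
  have h := pv_outer key d1 [] [] [] [] [] []
  exact congrArg PySem.Dict.items h
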